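-- pv_equiv track=rewrite | github.com/Yonimirror/techain-ia | core/strategies/indicators.py | crossunder
-- ===== SOURCE A (Python) =====
-- def crossunder(series_a: list, series_b: list) -> list[bool]:
--     """Returns True at index where series_a crosses below series_b."""
--     result = [False] * len(series_a)
--     for i in range(1, len(series_a)):
--         a_curr, a_prev = series_a[i], series_a[i - 1]
--         b_curr, b_prev = series_b[i], series_b[i - 1]
--         if None in (a_curr, a_prev, b_curr, b_prev):
--             continue
--         if a_prev >= b_prev and a_curr < b_curr:
--             result[i] = True
--     return result
-- ===== SOURCE B (Python) =====
-- def crossunder(series_a: list, series_b: list) -> list[bool]: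
--     """Returns True at index where series_a crosses below series_b."""
--     n = len(series_a)
--     if n < 2:
--         return [False] * n
--     geq = [series_a[i] is not None and series_b[i] is not None
--            and series_a[i] >= series_b[i] for i in range(n)]
--     lt = [series_a[i] is not None and series_b[i] is not None
--           and series_a[i] < series_b[i] for i in range(n)]
--     result = [False] * n
--     for i in range(1, n):
--         result[i] = geq[i - 1] and lt[i]
--     return result
-- ===== Notes on version B (the rewrite author's own statement) =====
-- stated objective: alternative
-- what changed: Replaces A's inline per-index four-way None/compare test with two precomputed boolean state tables (geq, lt) over all indices plus a separate transition scan result[i] = geq[i-1] and lt[i].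
import Mathlib
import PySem

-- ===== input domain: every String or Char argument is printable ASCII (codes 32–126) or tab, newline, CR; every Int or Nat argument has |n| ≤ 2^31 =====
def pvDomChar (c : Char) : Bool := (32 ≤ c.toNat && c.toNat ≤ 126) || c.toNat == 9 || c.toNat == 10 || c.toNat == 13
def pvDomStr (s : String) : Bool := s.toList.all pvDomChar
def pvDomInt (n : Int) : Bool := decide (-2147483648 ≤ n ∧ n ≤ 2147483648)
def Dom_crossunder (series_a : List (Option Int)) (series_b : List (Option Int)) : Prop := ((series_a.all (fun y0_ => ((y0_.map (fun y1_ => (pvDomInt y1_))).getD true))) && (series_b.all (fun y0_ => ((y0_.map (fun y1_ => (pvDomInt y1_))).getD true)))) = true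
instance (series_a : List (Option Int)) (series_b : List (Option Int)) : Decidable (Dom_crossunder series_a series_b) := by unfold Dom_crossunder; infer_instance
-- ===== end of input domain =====

-- B replaces A's inline per-index test by two precomputed boolean state tables plus a
-- transition scan (alternative decomposition, same cost); return values agree on Pre_.

-- ===== PORT A =====
def crossunder (series_a : List (Option Int)) (series_b : List (Option Int)) : List Bool :=
  (PySem.List.pyRange 1 series_a.length 1).foldl
    (fun result i =>
      match PySem.List.pyGetD series_a i none, PySem.List.pyGetD series_a (i - 1) none,
            PySem.List.pyGetD series_b i none, PySem.List.pyGetD series_b (i - 1) none with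
      | some a_curr, some a_prev, some b_curr, some b_prev =>
          if a_prev ≥ b_prev ∧ a_curr < b_curr then PySem.List.pySetD result i true else result
      | _, _, _, _ => result)
    (List.replicate series_a.length false)

-- ===== PORT B =====
def crossunder_alt (series_a : List (Option Int)) (series_b : List (Option Int)) : List Bool :=
  let n : Int := series_a.length
  if n < 2 then List.replicate series_a.length false
  else
    let geq := (PySem.List.pyRange 0 n 1).map (fun i =>
      let a := PySem.List.pyGetD series_a i none
      let b := PySem.List.pyGetD series_b i none
      a.isSome && b.isSome && decide (a.getD 0 ≥ b.getD 0))
    let lt := (PySem.List.pyRange 0 n 1).map (fun i =>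
      let a := PySem.List.pyGetD series_a i none
      let b := PySem.List.pyGetD series_b i none
      a.isSome && b.isSome && decide (a.getD 0 < b.getD 0))
    (PySem.List.pyRange 1 n 1).foldl
      (fun result i =>
        PySem.List.pySetD result i
          (PySem.List.pyGetD geq (i - 1) false && PySem.List.pyGetD lt i false))
      (List.replicate series_a.length false)

-- ===== PRECONDITION & SPEC =====
-- Pre_ excludes exactly the inputs where A raises IndexError: len(series_a) ≥ 2 with series_b shorter.
def Pre_crossunder (series_a : List (Option Int)) (series_b : List (Option Int)) : Prop :=
  series_a.length ≤ 1 ∨ series_a.length ≤ series_b.length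
instance (series_a : List (Option Int)) (series_b : List (Option Int)) : Decidable (Pre_crossunder series_a series_b) := by unfold Pre_crossunder; infer_instance
def pvWitness_crossunder : List (Option Int) × List (Option Int) := ([some 2, some 1], [some 1, some 2])

def Spec_crossunder (series_a : List (Option Int)) (series_b : List (Option Int)) (out : List Bool) : Prop := out = crossunder_alt series_a series_b
instance (series_a : List (Option Int)) (series_b : List (Option Int)) (out : List Bool) : Decidable (Spec_crossunder series_a series_b out) := by unfold Spec_crossunder; infer_instance

-- ===== CLAIM (what is proved, stated in full; the proofs are below) =====
def Claim_equal_crossunder : Prop := ∀ (series_a : List (Option Int)) (series_b : List (Option Int)), Dom_crossunder series_a series_b → Pre_crossunder series_a series_b → Spec_crossunder series_a series_b (crossunder series_a series_b)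

-- ===== LEMMAS AND PROOFS =====

-- characterisation of B's loop: each visited index is overwritten with g i
lemma loop_set_getElem? (g : Int → Bool) :
    ∀ (k : ℕ) (a b : Int), b - a ≤ (k : Int) → 0 ≤ a → ∀ (r : List Bool), b ≤ (r.length : Int) →
    ∀ (j : ℕ),
      ((PySem.List.pyRange a b 1).foldl (fun acc i => PySem.List.pySetD acc i (g i)) r)[j]? =
        if a ≤ (j : Int) ∧ (j : Int) < b then some (g j) else r[j]? := by
  intro k
  induction k with
  | zero =>
      intro a b hk ha r hr j
      rw [PySem.List.pyRange_one_eq_nil (by omega)]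
      simp only [List.foldl_nil]
      rw [if_neg (by omega)]
  | succ k ih =>
      intro a b hk ha r hr j
      by_cases hab : b ≤ a
      · rw [PySem.List.pyRange_one_eq_nil hab]
        simp only [List.foldl_nil]
        rw [if_neg (by omega)]
      · rw [PySem.List.pyRange_one_cons (by omega)]
        simp only [List.foldl_cons]
        rw [ih (a + 1) b (by omega) (by omega) _ (by rw [PySem.List.length_pySetD]; omega) j]
        rw [PySem.List.pySetD_of_nonneg r (g a) ha]
        rcases eq_or_ne (j : Int) a with hj | hj
        · have hjn : j = a.toNat := by omega
          have hjr : j < r.length := by omega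
          rw [if_neg (by omega), if_pos (by omega)]
          rw [hjn, List.getElem?_set_self (by omega), Int.toNat_of_nonneg ha]
        · rw [List.getElem?_set_ne (by omega)]
          by_cases hin : a ≤ (j : Int) ∧ (j : Int) < b
          · rw [if_pos (by omega), if_pos (by omega)]
          · rw [if_neg (by omega), if_neg (by omega)]

-- characterisation of A's loop (conditional write of true)
lemma loop_cond_getElem? (C : Int → Bool) :
    ∀ (k : ℕ) (a b : Int), b - a ≤ (k : Int) → 0 ≤ a → ∀ (r : List Bool), b ≤ (r.length : Int) →
    ∀ (j : ℕ),
      ((PySem.List.pyRange a b 1).foldl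
        (fun acc i => if C i then PySem.List.pySetD acc i true else acc) r)[j]? =
        if a ≤ (j : Int) ∧ (j : Int) < b ∧ C j then some true else r[j]? := by
  intro k
  induction k with
  | zero =>
      intro a b hk ha r hr j
      rw [PySem.List.pyRange_one_eq_nil (by omega)]
      simp only [List.foldl_nil]
      rw [if_neg (by rintro ⟨h1, h2, -⟩; omega)]
  | succ k ih =>
      intro a b hk ha r hr j
      by_cases hab : b ≤ a
      · rw [PySem.List.pyRange_one_eq_nil hab]
        simp only [List.foldl_nil]
        rw [if_neg (by rintro ⟨h1, h2, -⟩; omega)]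
      · rw [PySem.List.pyRange_one_cons (by omega)]
        simp only [List.foldl_cons]
        by_cases hc : C a
        · rw [if_pos hc,
            ih (a + 1) b (by omega) (by omega) _ (by rw [PySem.List.length_pySetD]; omega) j,
            PySem.List.pySetD_of_nonneg r true ha]
          rcases eq_or_ne (j : Int) a with hj | hj
          · have hjn : j = a.toNat := by omega
            rw [if_neg (by rintro ⟨h1, -, -⟩; omega),
              if_pos ⟨by omega, by omega, by rw [hj]; exact hc⟩]
            rw [hjn, List.getElem?_set_self (by omega)]
          · rw [List.getElem?_set_ne (by omega)]
            by_cases hin : a ≤ (j : Int) ∧ (j : Int) < b ∧ C j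
            · rw [if_pos ⟨by omega, hin.2.1, hin.2.2⟩, if_pos hin]
            · rw [if_neg (by rintro ⟨h1, h2, h3⟩; exact hin ⟨by omega, h2, h3⟩)]
              rw [if_neg hin]
        · rw [if_neg hc, ih (a + 1) b (by omega) (by omega) r hr j]
          rcases eq_or_ne (j : Int) a with hj | hj
          · rw [if_neg (by rintro ⟨h1, -, -⟩; omega),
              if_neg (by rw [← hj] at hc; rintro ⟨-, -, h3⟩; exact hc h3)]
          · by_cases hin : a ≤ (j : Int) ∧ (j : Int) < b ∧ C j
            · rw [if_pos ⟨by omega, hin.2.1, hin.2.2⟩, if_pos hin]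
            · rw [if_neg (by rintro ⟨h1, h2, h3⟩; exact hin ⟨by omega, h2, h3⟩)]
              rw [if_neg hin]

-- A's per-index condition, extracted as a boolean
def condA (series_a series_b : List (Option Int)) (i : Int) : Bool :=
  match PySem.List.pyGetD series_a i none, PySem.List.pyGetD series_a (i - 1) none,
        PySem.List.pyGetD series_b i none, PySem.List.pyGetD series_b (i - 1) none with
  | some a_curr, some a_prev, some b_curr, some b_prev => decide (a_prev ≥ b_prev ∧ a_curr < b_curr)
  | _, _, _, _ => false

lemma stepA_eq (series_a series_b : List (Option Int)) :
    (fun (result : List Bool) (i : Int) =>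
      match PySem.List.pyGetD series_a i none, PySem.List.pyGetD series_a (i - 1) none,
            PySem.List.pyGetD series_b i none, PySem.List.pyGetD series_b (i - 1) none with
      | some a_curr, some a_prev, some b_curr, some b_prev =>
          if a_prev ≥ b_prev ∧ a_curr < b_curr then PySem.List.pySetD result i true else result
      | _, _, _, _ => result) =
    fun result i => if condA series_a series_b i then PySem.List.pySetD result i true else result := by
  funext result i
  unfold condA
  rcases PySem.List.pyGetD series_a i none with _ | ac <;>
    rcases PySem.List.pyGetD series_a (i - 1) none with _ | ap <;>
    rcases PySem.List.pyGetD series_b i none with _ | bc <;>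
    rcases PySem.List.pyGetD series_b (i - 1) none with _ | bp <;>
    simp

theorem crossunder_spec : Claim_equal_crossunder := by
  intro sa sb _ hpre
  unfold Spec_crossunder crossunder crossunder_alt
  by_cases hn : (sa.length : Int) < 2
  · rw [if_pos hn, PySem.List.pyRange_one_eq_nil (by omega)]
    simp
  · rw [if_neg hn]
    have hlen : sa.length ≤ sb.length := by
      rcases hpre with h | h
      · omega
      · exact h
    rw [stepA_eq sa sb]
    apply List.ext_getElem?
    intro j
    rw [loop_cond_getElem? (condA sa sb) sa.length 1 sa.length (by omega) (by omega)
        (List.replicate sa.length false) (by simp) j,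
      loop_set_getElem? _ sa.length 1 sa.length (by omega) (by omega)
        (List.replicate sa.length false) (by simp) j]
    by_cases hj : 1 ≤ (j : Int) ∧ (j : Int) < sa.length
    · -- inside the scanned range: both sides reduce to the same per-index boolean
      have hrep : (List.replicate sa.length false)[j]? = some false := by
        rw [List.getElem?_replicate, if_pos (by omega)]
      rw [hrep]
      rw [PySem.List.pyGetD_map_pyRange_of_nonneg _ (sa.length : Int) ((j : Int) - 1) false
            (by omega) (by omega),
          PySem.List.pyGetD_map_pyRange_of_nonneg _ (sa.length : Int) (j : Int) false
            (by omega) (by omega)]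
      have hCA : condA sa sb (j : Int) =
          (((PySem.List.pyGetD sa ((j : Int) - 1) none).isSome &&
            (PySem.List.pyGetD sb ((j : Int) - 1) none).isSome &&
            decide ((PySem.List.pyGetD sa ((j : Int) - 1) none).getD 0 ≥
                    (PySem.List.pyGetD sb ((j : Int) - 1) none).getD 0)) &&
           ((PySem.List.pyGetD sa (j : Int) none).isSome &&
            (PySem.List.pyGetD sb (j : Int) none).isSome &&
            decide ((PySem.List.pyGetD sa (j : Int) none).getD 0 <
                    (PySem.List.pyGetD sb (j : Int) none).getD 0))) := by
        unfold condA
        rcases PySem.List.pyGetD sa (j : Int) none with _ | ac <;>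
          rcases PySem.List.pyGetD sa ((j : Int) - 1) none with _ | ap <;>
          rcases PySem.List.pyGetD sb (j : Int) none with _ | bc <;>
          rcases PySem.List.pyGetD sb ((j : Int) - 1) none with _ | bp <;>
          simp [Bool.decide_and]; try rfl
      rw [← hCA]
      by_cases hc : condA sa sb (j : Int) = true
      · rw [if_pos ⟨hj.1, hj.2, hc⟩, if_pos hj, hc]
      · rw [if_neg (fun h => hc h.2.2), if_pos hj,
          (Bool.not_eq_true _).mp hc]
    · rw [if_neg (fun h => hj ⟨h.1, h.2.1⟩), if_neg hj]
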